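-- pv_equiv track=rewrite | github.com/happyrobot-ai/peach-state-triggers | integrations/meiborg_brothers/handlers/find_load.py | _extract_reference_numbers
-- ===== SOURCE A (Python) =====
-- from typing import Dict, Any, Optional, List, Tuple
--
-- def _extract_reference_numbers(order: Dict[str, Any]) -> Tuple[Optional[str], Optional[str]]:
--     """Return (pickup_number, po_number) from referenceNumbers by qualifiers."""
--     pickup = None
--     po = None
--     for st in (order.get("stops") or []):
--         for ref in (st.get("referenceNumbers") or []):
--             qual = (ref.get("reference_qual") or ref.get("__referenceQualDescr") or "").upper()
--             val = ref.get("reference_number")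
--             if not val:
--                 continue
--             if qual in ("OQ", "ORDER NUMBER") and not pickup:
--                 pickup = str(val)
--             if qual in ("PO", "PURCHASE ORDER NUMBER") and not po:
--                 po = str(val)
--         if pickup and po:
--             break
--     return pickup, po
-- ===== SOURCE B (Python) =====
-- def _first_truthy(refs, quals):
--     """First str(val) among refs whose qualifier is in quals and whose value is truthy."""
--     for ref in refs:
--         qual = (ref.get("reference_qual") or ref.get("__referenceQualDescr") or "").upper()
--         val = ref.get("reference_number")
--         if val and qual in quals:
--             return str(val)
--     return None
--
--
-- def _extract_reference_numbers(order):
--     """Return (pickup_number, po_number) from referenceNumbers by qualifiers."""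
--     refs = [r for st in (order.get("stops") or [])
--             for r in (st.get("referenceNumbers") or [])]
--     return (_first_truthy(refs, ("OQ", "ORDER NUMBER")),
--             _first_truthy(refs, ("PO", "PURCHASE ORDER NUMBER")))
-- ===== Notes on version B (the rewrite author's own statement) =====
-- stated objective: simpler
-- what changed: Replaces the stateful two-level loop with early break by flattening all reference numbers once and running two independent first-match searches through a shared helper.
import Mathlib
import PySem

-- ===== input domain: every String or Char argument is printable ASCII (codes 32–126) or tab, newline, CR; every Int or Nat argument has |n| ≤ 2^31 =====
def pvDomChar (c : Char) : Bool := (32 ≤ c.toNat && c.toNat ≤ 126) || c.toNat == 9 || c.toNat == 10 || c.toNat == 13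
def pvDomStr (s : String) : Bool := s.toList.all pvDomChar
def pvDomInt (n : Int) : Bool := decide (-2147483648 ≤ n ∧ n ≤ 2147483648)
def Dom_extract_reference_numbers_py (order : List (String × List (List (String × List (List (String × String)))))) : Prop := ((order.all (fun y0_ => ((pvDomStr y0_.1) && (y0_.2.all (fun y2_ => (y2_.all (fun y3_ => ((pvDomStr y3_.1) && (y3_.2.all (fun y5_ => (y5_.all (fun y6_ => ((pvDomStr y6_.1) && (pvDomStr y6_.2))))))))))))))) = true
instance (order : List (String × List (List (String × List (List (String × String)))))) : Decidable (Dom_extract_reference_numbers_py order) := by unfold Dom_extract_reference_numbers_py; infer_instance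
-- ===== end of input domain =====

-- B flattens the stops into one list of reference dicts and runs two independent
-- first-match searches via a shared helper, replacing A's stateful loop with break (simpler).


-- ===== PORT A =====
-- dict.get on an association list: first match, none if absent
def pvGet (d : List (String × α)) (k : String) : Option α := List.lookup k d

-- Python `a or b` chained over possibly-missing strings ("" is falsy)
def pvOrStr (a : Option String) (b : String) : String :=
  match a with
  | some s => if s = "" then b else s
  | none => b

-- (ref.get("reference_qual") or ref.get("__referenceQualDescr") or "").upper()
def pvQualOf (ref : List (String × String)) : String :=
  PySem.Str.upper (pvOrStr (pvGet ref "reference_qual") (pvOrStr (pvGet ref "__referenceQualDescr") ""))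

-- truthiness of the Option-String state (None and "" are falsy)
def pvTruthy (o : Option String) : Bool :=
  match o with
  | some s => s != ""
  | none => false

-- body of A's inner `for ref in …` loop, updating the (pickup, po) state
def pvStepRef (st8 : Option String × Option String) (ref : List (String × String)) :
    Option String × Option String :=
  let qual := pvQualOf ref
  match pvGet ref "reference_number" with
  | none => st8
  | some v =>
    if v = "" then st8
    else
      let p := if (qual == "OQ" || qual == "ORDER NUMBER") && !pvTruthy st8.1 then some v else st8.1
      let q := if (qual == "PO" || qual == "PURCHASE ORDER NUMBER") && !pvTruthy st8.2 then some v else st8.2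
      (p, q)

-- A's outer `for st in stops` loop with the `if pickup and po: break`
def pvLoopStops (stops : List (List (String × List (List (String × String)))))
    (st8 : Option String × Option String) : Option String × Option String :=
  match stops with
  | [] => st8
  | st :: rest =>
    let st8' := ((pvGet st "referenceNumbers").getD []).foldl pvStepRef st8
    if pvTruthy st8'.1 && pvTruthy st8'.2 then st8' else pvLoopStops rest st8'

def extract_reference_numbers_py (order : List (String × List (List (String × List (List (String × String)))))) : Option String × Option String :=
  pvLoopStops ((pvGet order "stops").getD []) (none, none)

-- ===== PORT B =====
-- Source B's _first_truthy: first str(val) among refs whose qualifier is in quals and val is truthy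
def pvFirstTruthy (quals : List String) (refs : List (List (String × String))) : Option String :=
  match refs with
  | [] => none
  | r :: rest =>
    let qual := pvQualOf r
    match pvGet r "reference_number" with
    | some v => if v != "" && quals.contains qual then some v else pvFirstTruthy quals rest
    | none => pvFirstTruthy quals rest

def extract_reference_numbers_py_alt (order : List (String × List (List (String × List (List (String × String)))))) : Option String × Option String :=
  let refs := ((pvGet order "stops").getD []).flatMap
    (fun st => (pvGet st "referenceNumbers").getD [])
  (pvFirstTruthy ["OQ", "ORDER NUMBER"] refs, pvFirstTruthy ["PO", "PURCHASE ORDER NUMBER"] refs)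

-- ===== PRECONDITION & SPEC =====
def Spec_extract_reference_numbers_py (order : List (String × List (List (String × List (List (String × String)))))) (out : Option String × Option String) : Prop := out = extract_reference_numbers_py_alt order
instance (order : List (String × List (List (String × List (List (String × String)))))) (out : Option String × Option String) : Decidable (Spec_extract_reference_numbers_py order out) := by unfold Spec_extract_reference_numbers_py; infer_instance

-- ===== CLAIM (what is proved, stated in full; the proofs are below) =====
def Claim_equal_extract_reference_numbers_py : Prop := ∀ (order : List (String × List (List (String × List (List (String × String)))))), Dom_extract_reference_numbers_py order → Spec_extract_reference_numbers_py order (extract_reference_numbers_py order)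

-- ===== LEMMAS AND PROOFS =====

-- `a if truthy else x`: how a set state survives the rest of the scan
def pvOrT (a x : Option String) : Option String := if pvTruthy a then a else x

-- first-of-two combinator (match form of Option.orElse, used to split a search at an append)
def pvMatchO (x y : Option String) : Option String :=
  match x with
  | some v => some v
  | none => y

-- one component of A's inner step, with the qualifier test phrased as membership
def pvStep1 (quals : List String) (p : Option String) (ref : List (String × String)) : Option String :=
  match pvGet ref "reference_number" with
  | none => p
  | some v =>
    if v = "" then p
    else if quals.contains (pvQualOf ref) && !pvTruthy p then some v else p

theorem pvContains_pair (a b q : String) : (([a, b] : List String).contains q) = (q == a || q == b) := by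
  simp only [List.contains, List.elem]
  cases q == a <;> cases q == b <;> rfl

theorem pvOrT_truthy {a : Option String} (x : Option String) (h : pvTruthy a = true) :
    pvOrT a x = a := by
  simp [pvOrT, h]

theorem pvOrT_noneL (x : Option String) : pvOrT none x = x := rfl

theorem pvOrT_noneR (a : Option String) (ha : pvTruthy a = false → a = none) :
    pvOrT a none = a := by
  cases hta : pvTruthy a with
  | true => exact pvOrT_truthy none hta
  | false => rw [ha hta]; rfl

theorem pvOrT_good (a x : Option String)
    (ha : pvTruthy a = false → a = none)
    (hx : x = none ∨ pvTruthy x = true) :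
    pvTruthy (pvOrT a x) = false → pvOrT a x = none := by
  cases hta : pvTruthy a with
  | true => rw [pvOrT_truthy x hta]; intro h; rw [hta] at h; exact absurd h (by simp)
  | false =>
    rw [ha hta, pvOrT_noneL]
    intro h
    cases hx with
    | inl h0 => exact h0
    | inr h1 => rw [h1] at h; exact absurd h (by simp)

theorem pvStepRef_eq (st8 : Option String × Option String) (r : List (String × String)) :
    pvStepRef st8 r
      = (pvStep1 ["OQ", "ORDER NUMBER"] st8.1 r, pvStep1 ["PO", "PURCHASE ORDER NUMBER"] st8.2 r) := by
  obtain ⟨p, q⟩ := st8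
  simp only [pvStepRef, pvStep1, pvContains_pair]
  cases pvGet r "reference_number" with
  | none => rfl
  | some v =>
    by_cases hv : v = ""
    · simp [hv]
    · simp [hv]

theorem pvFoldPair (refs : List (List (String × String))) (p q : Option String) :
    refs.foldl pvStepRef (p, q)
      = (refs.foldl (pvStep1 ["OQ", "ORDER NUMBER"]) p,
         refs.foldl (pvStep1 ["PO", "PURCHASE ORDER NUMBER"]) q) := by
  induction refs generalizing p q with
  | nil => rfl
  | cons r rest ih =>
    rw [List.foldl_cons, List.foldl_cons, List.foldl_cons, pvStepRef_eq]
    exact ih _ _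

-- a first-match search result is none or a truthy value
theorem pvFirstTruthy_good (quals : List String) (refs : List (List (String × String))) :
    pvFirstTruthy quals refs = none ∨ pvTruthy (pvFirstTruthy quals refs) = true := by
  induction refs with
  | nil => left; rfl
  | cons r rest ih =>
    simp only [pvFirstTruthy]
    cases pvGet r "reference_number" with
    | none => exact ih
    | some v =>
      dsimp only
      cases hc : (v != "" && quals.contains (pvQualOf r)) with
      | false =>
        rw [if_neg (by simp : ¬(false = true))]
        exact ih
      | true =>
        rw [if_pos rfl]
        right
        have hv : (v != "") = true := by
          simp only [Bool.and_eq_true] at hc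
          exact hc.1
        simpa [pvTruthy] using hv

theorem pvFirstTruthy_append (quals : List String) (a b : List (List (String × String))) :
    pvFirstTruthy quals (a ++ b)
      = pvMatchO (pvFirstTruthy quals a) (pvFirstTruthy quals b) := by
  induction a with
  | nil => rfl
  | cons r rest ih =>
    simp only [List.cons_append, pvFirstTruthy]
    cases pvGet r "reference_number" with
    | none => exact ih
    | some v =>
      dsimp only
      cases hc : (v != "" && quals.contains (pvQualOf r)) with
      | false =>
        rw [if_neg (by simp : ¬(false = true)), if_neg (by simp : ¬(false = true))]
        exact ih
      | true =>
        rw [if_pos rfl, if_pos rfl]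
        rfl

theorem pvFold1 (quals : List String) (refs : List (List (String × String))) (p : Option String)
    (hp : pvTruthy p = false → p = none) :
    refs.foldl (pvStep1 quals) p = pvOrT p (pvFirstTruthy quals refs) := by
  induction refs generalizing p with
  | nil => exact (pvOrT_noneR p hp).symm
  | cons r rest ih =>
    rw [List.foldl_cons]
    simp only [pvStep1, pvFirstTruthy]
    cases hg : pvGet r "reference_number" with
    | none => exact ih p hp
    | some v =>
      dsimp only
      by_cases hv : v = ""
      · have hvf : (v != "") = false := by simp [hv]
        rw [if_pos hv, hvf, Bool.false_and, if_neg (by simp : ¬(false = true))]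
        exact ih p hp
      · have hvt : (v != "") = true := by simp [hv]
        rw [if_neg hv, hvt, Bool.true_and]
        cases hc : quals.contains (pvQualOf r) with
        | false =>
          rw [Bool.false_and, if_neg (by simp : ¬(false = true)),
              if_neg (by simp : ¬(false = true))]
          exact ih p hp
        | true =>
          rw [Bool.true_and, if_pos rfl]
          cases htp : pvTruthy p with
          | true =>
            rw [Bool.not_true, if_neg (by simp : ¬(false = true))]
            rw [ih p hp, pvOrT_truthy _ htp, pvOrT_truthy _ htp]
          | false =>
            rw [Bool.not_false, if_pos rfl]
            have hsv : pvTruthy (some v) = true := by simpa [pvTruthy] using hvt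
            rw [ih (some v) (by intro h; rw [hsv] at h; exact absurd h (by simp)),
                pvOrT_truthy _ hsv, hp htp, pvOrT_noneL]

theorem pvOrT_flat (p x y : Option String)
    (hp : pvTruthy p = false → p = none)
    (hx : x = none ∨ pvTruthy x = true) :
    pvOrT p (pvMatchO x y) = pvOrT (pvOrT p x) y := by
  cases htp : pvTruthy p with
  | true => rw [pvOrT_truthy _ htp, pvOrT_truthy _ htp, pvOrT_truthy _ htp]
  | false =>
    rw [hp htp, pvOrT_noneL, pvOrT_noneL]
    cases hx with
    | inl h0 => rw [h0, pvOrT_noneL]; rfl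
    | inr h1 =>
      cases x with
      | none => exact absurd h1 (by simp [pvTruthy])
      | some w => rw [pvOrT_truthy _ h1]; rfl

-- A's outer loop (with its break) on a clean state equals B's flattened first-match searches
theorem pvLoop_eq (stops : List (List (String × List (List (String × String)))))
    (p q : Option String)
    (hp : pvTruthy p = false → p = none) (hq : pvTruthy q = false → q = none) :
    pvLoopStops stops (p, q)
      = (pvOrT p (pvFirstTruthy ["OQ", "ORDER NUMBER"]
            (stops.flatMap (fun st => (pvGet st "referenceNumbers").getD []))),
         pvOrT q (pvFirstTruthy ["PO", "PURCHASE ORDER NUMBER"]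
            (stops.flatMap (fun st => (pvGet st "referenceNumbers").getD [])))) := by
  induction stops generalizing p q with
  | nil =>
    simp only [pvLoopStops, List.flatMap_nil, pvFirstTruthy]
    rw [pvOrT_noneR p hp, pvOrT_noneR q hq]
  | cons st rest ih =>
    simp only [pvLoopStops, List.flatMap_cons]
    rw [pvFoldPair, pvFold1 _ _ p hp, pvFold1 _ _ q hq,
        pvFirstTruthy_append, pvFirstTruthy_append,
        pvOrT_flat p _ _ hp (pvFirstTruthy_good _ _),
        pvOrT_flat q _ _ hq (pvFirstTruthy_good _ _)]
    have g1 := pvOrT_good p _ hp (pvFirstTruthy_good ["OQ", "ORDER NUMBER"]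
      ((pvGet st "referenceNumbers").getD []))
    have g2 := pvOrT_good q _ hq (pvFirstTruthy_good ["PO", "PURCHASE ORDER NUMBER"]
      ((pvGet st "referenceNumbers").getD []))
    dsimp only
    cases hb : pvTruthy (pvOrT p (pvFirstTruthy ["OQ", "ORDER NUMBER"]
          ((pvGet st "referenceNumbers").getD [])))
        && pvTruthy (pvOrT q (pvFirstTruthy ["PO", "PURCHASE ORDER NUMBER"]
          ((pvGet st "referenceNumbers").getD []))) with
    | true =>
      rw [if_pos rfl]
      simp only [Bool.and_eq_true] at hb
      rw [pvOrT_truthy _ hb.1, pvOrT_truthy _ hb.2]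
    | false =>
      rw [if_neg (by simp : ¬(false = true))]
      exact ih _ _ g1 g2

-- ===== VERDICT (by name: the statement is the Claim_ definition above) =====
theorem extract_reference_numbers_py_spec : Claim_equal_extract_reference_numbers_py := by
  intro order _
  unfold Spec_extract_reference_numbers_py extract_reference_numbers_py extract_reference_numbers_py_alt
  rw [pvLoop_eq _ none none (fun _ => rfl) (fun _ => rfl)]
  rfl
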